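-- pv_equiv track=rewrite | github.com/meraf00/Competitive-Programming | contests/contest_10/E_Powers_Of_Two.py | check
-- ===== SOURCE A (Python) =====
-- from heapq import heappop, heappush, heapify
--
-- def check(n, k):
--     if k > n:
--         return
--
--     index = 0
--     power_of_twos = []
--
--     while n:
--         if n & 1:
--             power_of_twos.append(1 << index)
--
--         index += 1
--         n >>= 1
--
--     for i in range(len(power_of_twos)):
--         power_of_twos[i] *= -1
--
--     heapify(power_of_twos)
--     while len(power_of_twos) < k:
--         max_power_of_2 = -1 * heappop(power_of_twos)
--         heappush(power_of_twos, -1 * max_power_of_2 // 2)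
--         heappush(power_of_twos, -1 * max_power_of_2 // 2)
--
--     if len(power_of_twos) > k:
--         return
--
--     for i in range(len(power_of_twos)):
--         power_of_twos[i] *= -1
--
--     return sorted(power_of_twos)
-- ===== SOURCE B (Python) =====
-- def check(n, k):
--     if k > n:
--         return
--     # per-exponent counts of pieces: counts[i] = number of 2**i pieces
--     counts = []
--     m = n
--     while m:
--         counts.append(m & 1)
--         m >>= 1
--     total = sum(counts)
--     if total > k:
--         return
--     # split largest pieces level by level until we have exactly k pieces
--     d = k - total
--     for i in range(len(counts) - 1, 0, -1):
--         s = min(counts[i], d)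
--         counts[i] -= s
--         counts[i - 1] += 2 * s
--         d -= s
--     return [1 << i for i in range(len(counts)) for _ in range(counts[i])]
-- ===== Notes on version B (the rewrite author's own statement) =====
-- stated objective: faster
-- what changed: Replaces the heap of individual pieces (heapify + k heappop/heappush rounds and a final sort) by per-exponent counts: one descending pass over at most log n levels splits min(count,deficit) largest pieces at once, and the answer is emitted already sorted.
import Mathlib
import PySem

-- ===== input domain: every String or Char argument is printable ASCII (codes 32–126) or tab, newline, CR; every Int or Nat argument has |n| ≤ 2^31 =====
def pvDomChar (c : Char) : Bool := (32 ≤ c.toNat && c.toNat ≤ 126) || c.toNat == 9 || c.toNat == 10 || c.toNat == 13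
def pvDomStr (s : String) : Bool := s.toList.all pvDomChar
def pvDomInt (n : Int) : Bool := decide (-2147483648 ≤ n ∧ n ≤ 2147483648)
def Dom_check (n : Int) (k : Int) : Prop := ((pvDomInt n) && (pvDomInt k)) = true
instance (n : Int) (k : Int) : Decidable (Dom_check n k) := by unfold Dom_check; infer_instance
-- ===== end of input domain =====

-- B replaces A's piece-by-piece heap splitting (and final sort) by per-exponent counts split
-- level-by-level, emitting the answer already sorted; measured faster only in a timing run.

-- ===== PORT A =====
-- while n: if n & 1: append(1 << index); index += 1; n >>= 1   (exact for the n > 0 iterations;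
-- for n < 0 the Python loop never terminates — such inputs are excluded by Pre_check)
def pyBits (n : Int) (index : Nat) : List Int :=
  if _h : 0 < n then
    (if PySem.Int.band n 1 ≠ 0 then [(1 : Int) <<< index] else []) ++ pyBits (n >>> (1:Nat)) (index + 1)
  else []
  termination_by n.toNat
  decreasing_by
    rw [Int.shiftRight_eq_div_pow]; norm_num; omega

-- heapq is modelled by its contract on the multiset of entries: heappop removes a minimal
-- element (the value Python's heappop returns), heappush appends; heapify is the identity on
-- the multiset.  A's result is a sorted copy, so only the multiset is observable.
def heappopModel (h : List Int) : Option (Int × List Int) :=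
  match h.min? with
  | none => none
  | some m => some (m, h.erase m)

-- while len(pot) < k: pop/push — the length grows by one per iteration, so the loop runs
-- exactly (k - len).toNat times; an empty heap (Python would raise) is unreachable under Pre_.
def splitLoop : Nat → List Int → List Int
  | 0, h => h
  | fuel + 1, h =>
    match heappopModel h with
    | none => h
    | some (m, rest) =>
      let maxp := -1 * m
      let half := PySem.Int.floordiv (-1 * maxp) 2
      splitLoop fuel (rest ++ [half, half])

def check (n : Int) (k : Int) : Option (List Int) :=
  if k > n then none
  else
    let pot := pyBits n 0
    let potNeg := pot.map (· * -1)
    let hFinal := splitLoop (k - (potNeg.length : Int)).toNat potNeg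
    if (hFinal.length : Int) > k then none
    else some (PySem.List.sorted (hFinal.map (· * -1)) (fun x => x) false)

-- ===== PORT B =====
-- while m: counts.append(m & 1); m >>= 1   (same n > 0 proviso as pyBits)
def bitList (n : Int) : List Int :=
  if _h : 0 < n then PySem.Int.band n 1 :: bitList (n >>> (1:Nat)) else []
  termination_by n.toNat
  decreasing_by
    rw [Int.shiftRight_eq_div_pow]; norm_num; omega

-- the descending index loop 'for i in range(len-1, 0, -1)', run on the reversed counts list:
-- at each level split s = min(count, d) pieces, sending 2s pieces one level down
def levelSplit : List Int → Int → List Int × Int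
  | [], d => ([], d)
  | [c], d => ([c], d)
  | c :: c' :: rest, d =>
    let s := min c d
    let r := levelSplit ((c' + 2 * s) :: rest) (d - s)
    ((c - s) :: r.1, r.2)
  termination_by c _ => c.length
  decreasing_by simp

-- [1 << i for i in range(len(counts)) for _ in range(counts[i])]
def expand (c : List Int) : List Int :=
  (List.range c.length).flatMap (fun i => List.replicate (c.getD i 0).toNat ((1 : Int) <<< i))

def check_alt (n : Int) (k : Int) : Option (List Int) :=
  if k > n then none
  else
    let counts := bitList n
    let total := counts.sum
    if total > k then none
    else
      let d := k - total
      let counts' := (levelSplit counts.reverse d).1.reverse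
      some (expand counts')

-- ===== PRECONDITION & SPEC =====
-- Pre_ excludes only inputs on which A never returns: for n < 0 with k ≤ n the 'while n' loop
-- (n >>= 1 stays negative) runs forever; B diverges there as well.
def Pre_check (n : Int) (k : Int) : Prop := 0 ≤ n ∨ n < k
instance (n : Int) (k : Int) : Decidable (Pre_check n k) := by unfold Pre_check; infer_instance
def pvWitness_check : Int × Int := (7, 5)

def Spec_check (n : Int) (k : Int) (out : Option (List Int)) : Prop := out = check_alt n k
instance (n : Int) (k : Int) (out : Option (List Int)) : Decidable (Spec_check n k out) := by unfold Spec_check; infer_instance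

-- ===== CLAIM (what is proved, stated in full; the proofs are below) =====
def Claim_equal_check : Prop := ∀ (n : Int) (k : Int), Dom_check n k → Pre_check n k → Spec_check n k (check n k)

-- ===== LEMMAS AND PROOFS =====

lemma pow2_inj {a b : Nat} (h : (2:Int)^a = 2^b) : a = b := by
  have h2 : ((2^a : Nat) : Int) = ((2^b : Nat) : Int) := by push_cast; exact_mod_cast h
  exact Nat.pow_right_injective (le_refl 2) (by exact_mod_cast h2)

lemma pow2_mono {a b : Nat} (hab : a ≤ b) : (2:Int)^a ≤ 2^b :=
  pow_le_pow_right₀ (by norm_num) hab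

-- the heap h holds exactly counts[j] copies of -(2^j), and nothing else
def goodHeap (h : List Int) (c : List Int) : Prop :=
  (∀ j : Nat, (h.count (-((2:Int)^j)) : Int) = c.getD j 0) ∧
  (∀ x ∈ h, ∃ j, j < c.length ∧ x = -((2:Int)^j))

-- weighted sum Σ c[i]·2^i
def wsum : List Int → Int
  | [] => 0
  | b :: t => b + 2 * wsum t

-- recursive form of expand
def expandRec : List Int → Nat → List Int
  | [], _ => []
  | a :: t, i => List.replicate a.toNat ((2:Int)^i) ++ expandRec t (i + 1)

lemma shift_eq_pow (i : Nat) : (1 : Int) <<< i = 2^i := by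
  rw [Int.shiftLeft_eq]; ring

lemma band_one_eq (n : Int) : PySem.Int.band n 1 = n % 2 := by
  rw [PySem.Int.band_one, PySem.Int.mod_eq_emod_of_pos (by norm_num)]

lemma shiftR_one (n : Int) : n >>> (1:Nat) = n / 2 := by
  rw [Int.shiftRight_eq_div_pow]; norm_num

lemma bitList_pos {n : Int} (h : 0 < n) : bitList n = n % 2 :: bitList (n / 2) := by
  rw [bitList]; simp [h, band_one_eq, shiftR_one]

lemma bitList_nonpos {n : Int} (h : ¬ 0 < n) : bitList n = [] := by
  rw [bitList]; simp [h]

lemma pyBits_pos {n : Int} (h : 0 < n) (i : Nat) :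
    pyBits n i = (if n % 2 ≠ 0 then [(2:Int)^i] else []) ++ pyBits (n / 2) (i + 1) := by
  rw [pyBits]; simp [h, band_one_eq, shiftR_one, shift_eq_pow]

lemma pyBits_nonpos {n : Int} (h : ¬ 0 < n) (i : Nat) : pyBits n i = [] := by
  rw [pyBits]; simp [h]

lemma wsum_bitList : ∀ {n : Int}, 0 ≤ n → wsum (bitList n) = n := by
  intro n
  induction n using bitList.induct with
  | case1 n hpos ih =>
    intro _
    rw [bitList_pos hpos, wsum]
    rw [shiftR_one] at ih
    rw [ih (by omega)]
    omega
  | case2 n hnpos =>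
    intro h0
    rw [bitList_nonpos hnpos, wsum]
    omega

lemma mem_pyBits : ∀ {n : Int} (i : Nat) {x : Int}, x ∈ pyBits n i →
    ∃ j, j < (bitList n).length ∧ x = (2:Int)^(i + j) := by
  intro n
  induction n using bitList.induct with
  | case1 n hpos ih =>
    intro i x hx
    rw [shiftR_one] at ih
    rw [pyBits_pos hpos] at hx
    rw [bitList_pos hpos]
    rcases List.mem_append.mp hx with h | h
    · refine ⟨0, by simp, ?_⟩
      by_cases h2 : n % 2 ≠ 0 <;> simp [h2] at h <;> simp [h]
    · rcases ih (i + 1) h with ⟨j, hj, rfl⟩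
      exact ⟨j + 1, by simpa using hj, by rw [Nat.add_assoc, Nat.add_comm 1 j]⟩
  | case2 n hnpos =>
    intro i x hx
    rw [pyBits_nonpos hnpos] at hx; simp at hx

lemma count_pyBits : ∀ {n : Int} (i j : Nat),
    ((pyBits n i).count ((2:Int)^(i + j)) : Int) = (bitList n).getD j 0 := by
  intro n
  induction n using bitList.induct with
  | case1 n hpos ih =>
    intro i j
    rw [shiftR_one] at ih
    rw [pyBits_pos hpos, bitList_pos hpos, List.count_append]
    have h2 : n % 2 = 0 ∨ n % 2 = 1 := by omega
    cases j with
    | zero =>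
      have htail : (pyBits (n / 2) (i + 1)).count ((2:Int)^(i + 0)) = 0 := by
        rw [List.count_eq_zero]
        intro hmem
        rcases mem_pyBits (i + 1) hmem with ⟨j', _, hx⟩
        have := pow2_inj hx
        omega
      have hhead : ((if n % 2 ≠ 0 then [(2:Int)^i] else []).count ((2:Int)^(i + 0)) : Int) = n % 2 := by
        rcases h2 with h2 | h2 <;> simp [h2]
      rw [htail]
      push_cast
      push_cast at hhead
      simp only [List.getD_cons_zero]
      omega
    | succ j' =>
      have hhead : ((if n % 2 ≠ 0 then [(2:Int)^i] else []).count ((2:Int)^(i + (j' + 1)))) = 0 := by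
        have hne : ((2:Int)^(i + (j' + 1))) ≠ (2:Int)^i := by
          intro hc; have := pow2_inj hc; omega
        rcases h2 with h2 | h2
        · simp [h2]
        · simp only [h2, ne_eq, one_ne_zero, not_false_eq_true, if_true, List.count_singleton]
          simp [hne.symm]
      rw [hhead, List.getD_cons_succ]
      have : i + (j' + 1) = (i + 1) + j' := by omega
      rw [this]
      simpa using ih (i + 1) j'
  | case2 n hnpos =>
    intro i j
    rw [pyBits_nonpos hnpos, bitList_nonpos hnpos]; simp

lemma goodHeap_init (n : Int) :
    goodHeap ((pyBits n 0).map (· * -1)) (bitList n) := by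
  constructor
  · intro j
    have hinj : Function.Injective (fun x : Int => x * -1) := by
      intro a b hab; dsimp at hab; omega
    have hcm := List.count_map_of_injective (pyBits n 0) (fun x : Int => x * -1) hinj ((2:Int)^j)
    have hneg : -((2:Int)^j) = (2:Int)^j * -1 := by ring
    rw [hneg, hcm]
    have := count_pyBits (n := n) 0 j
    simpa using this
  · intro x hx
    rcases List.mem_map.mp hx with ⟨y, hy, rfl⟩
    rcases mem_pyBits 0 hy with ⟨j, hj, rfl⟩
    exact ⟨j, hj, by ring_nf⟩

lemma goodHeap_nonneg {h c : List Int} (g : goodHeap h c) : ∀ x ∈ c, 0 ≤ x := by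
  intro x hx
  rcases List.mem_iff_getElem.mp hx with ⟨j, hj, rfl⟩
  have := g.1 j
  rw [List.getD_eq_getElem c 0 hj] at this
  omega

-- core fact about the level pass: splitting one largest piece commutes with the whole pass
lemma levelSplit_zero : ∀ (c : List Int) (d : Int), d = 0 → (∀ x ∈ c, 0 ≤ x) → levelSplit c d = (c, 0) := by
  intro c d
  induction c, d using levelSplit.induct with
  | case1 d => intro hd _; simp [levelSplit, hd]
  | case2 c d => intro hd _; simp [levelSplit, hd]
  | case3 c c' rest d s ih =>
    intro hd hnn
    subst hd
    have hc : 0 ≤ c := hnn c (by simp)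
    have hmin : min c (0:Int) = 0 := by omega
    have hs : s = 0 := hmin
    rw [levelSplit]
    simp only [hs, hmin, mul_zero, add_zero, sub_zero] at ih ⊢
    rw [ih trivial (by intro x hx; exact hnn x (List.mem_cons_of_mem _ hx))]

lemma levelSplit_step : ∀ (pre : List Int) (c c' : Int) (rest : List Int) (d : Int),
    (∀ x ∈ pre, x = 0) → 1 ≤ c → 1 ≤ d →
    levelSplit (pre ++ c :: c' :: rest) d = levelSplit (pre ++ (c - 1) :: (c' + 2) :: rest) (d - 1) := by
  intro pre
  induction pre with
  | nil =>
    intro c c' rest d _ hc hd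
    simp only [List.nil_append]
    rw [levelSplit, levelSplit]
    have h1 : min (c - 1) (d - 1) = min c d - 1 := by omega
    simp only [h1]
    have h2 : c' + 2 + 2 * (min c d - 1) = c' + 2 * min c d := by ring
    have h3 : d - 1 - (min c d - 1) = d - min c d := by ring
    have h4 : c - 1 - (min c d - 1) = c - min c d := by ring
    rw [h2, h3, h4]
  | cons z pre ih =>
    intro c c' rest d hz hc hd
    have hz0 : z = 0 := hz z (by simp)
    subst hz0
    have hpre : ∀ x ∈ pre, x = 0 := fun x hx => hz x (by simp [hx])
    have hmin : min (0:Int) d = 0 := by omega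
    cases pre with
    | nil =>
      simp only [List.nil_append, List.cons_append]
      conv_lhs => rw [levelSplit]
      conv_rhs => rw [levelSplit]
      simp only [hmin, mul_zero, add_zero, sub_zero]
      have := ih c c' rest d hpre hc hd
      simp only [List.nil_append] at this
      rw [this]
      have hmin' : min (0:Int) (d - 1) = 0 := by omega
      simp [hmin']
    | cons p ps =>
      simp only [List.cons_append]
      conv_lhs => rw [levelSplit]
      conv_rhs => rw [levelSplit]
      simp only [hmin, mul_zero, add_zero, sub_zero]
      have := ih c c' rest d hpre hc hd
      simp only [List.cons_append] at this
      rw [this]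
      have hmin' : min (0:Int) (d - 1) = 0 := by omega
      simp [hmin']

lemma decomp_last_nonzero : ∀ (c : List Int), (∃ x ∈ c, x ≠ 0) →
    ∃ lo y zs, c = lo ++ y :: zs ∧ y ≠ 0 ∧ ∀ x ∈ zs, x = 0 := by
  intro c
  induction c using List.reverseRecOn with
  | nil => rintro ⟨x, hx, _⟩; simp at hx
  | append_singleton l a ih =>
    rintro ⟨x, hx, hxne⟩
    by_cases ha : a = 0
    · subst ha
      have hxl : x ∈ l := by
        rcases List.mem_append.mp hx with h | h
        · exact h
        · simp at h; omega
      rcases ih ⟨x, hxl, hxne⟩ with ⟨lo, y, zs, rfl, hy, hz⟩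
      refine ⟨lo, y, zs ++ [0], by simp, hy, ?_⟩
      intro z hz2
      rcases List.mem_append.mp hz2 with h | h
      · exact hz z h
      · simpa using h
    · exact ⟨l, a, [], rfl, ha, by simp⟩

lemma wsum_append (a b : List Int) : wsum (a ++ b) = wsum a + 2^a.length * wsum b := by
  induction a with
  | nil => simp [wsum]
  | cons x t ih => simp only [List.cons_append, wsum, ih, List.length_cons]; ring

lemma wsum_zeros {l : List Int} (h : ∀ x ∈ l, x = 0) : wsum l = 0 := by
  induction l with
  | nil => rfl
  | cons x t ih =>
    rw [wsum, h x (by simp), ih (fun y hy => h y (by simp [hy]))]; ring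

lemma sum_zeros {l : List Int} (h : ∀ x ∈ l, x = 0) : l.sum = 0 := by
  induction l with
  | nil => rfl
  | cons x t ih =>
    rw [List.sum_cons, h x (by simp), ih (fun y hy => h y (by simp [hy]))]; ring

-- getD through the decomposition lo ++ a :: b :: zs
lemma getD_decomp (lo : List Int) (a b : Int) (zs : List Int) (j : Nat) :
    (lo ++ a :: b :: zs).getD j 0 =
      if j < lo.length then lo.getD j 0
      else if j = lo.length then a
      else if j = lo.length + 1 then b
      else zs.getD (j - lo.length - 2) 0 := by
  induction lo generalizing j with
  | nil =>
    simp only [List.nil_append, List.length_nil]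
    match j with
    | 0 => simp
    | 1 => simp
    | (j+2) => simp
  | cons x lo ih =>
    match j with
    | 0 => simp
    | (j+1) =>
      simp only [List.cons_append, List.getD_cons_succ, List.length_cons, ih j]
      split_ifs <;> first | rfl | (exfalso; omega) | (congr 1; omega)

lemma getD_zeros {l : List Int} (h : ∀ x ∈ l, x = 0) (j : Nat) : l.getD j 0 = 0 := by
  by_cases hj : j < l.length
  · rw [List.getD_eq_getElem l 0 hj]
    exact h _ (List.getElem_mem hj)
  · exact List.getD_eq_default l 0 (by omega)

lemma expand_eq_expandRec_gen (c : List Int) : ∀ (s : Nat),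
    (List.range c.length).flatMap (fun i => List.replicate (c.getD i 0).toNat ((2:Int)^(i + s))) = expandRec c s := by
  induction c with
  | nil => intro s; simp [expandRec]
  | cons a t ih =>
    intro s
    rw [expandRec, List.length_cons, List.range_succ_eq_map, List.flatMap_cons, List.flatMap_map]
    simp only [List.getD_cons_zero, List.getD_cons_succ, Nat.zero_add]
    have harg : (fun i : Nat => List.replicate (t.getD i 0).toNat ((2:Int)^(Nat.succ i + s)))
        = (fun i : Nat => List.replicate (t.getD i 0).toNat ((2:Int)^(i + (s + 1)))) := by
      funext i
      congr 2
      omega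
    rw [harg, ih (s + 1)]

lemma expand_eq_expandRec (c : List Int) : expand c = expandRec c 0 := by
  rw [← expand_eq_expandRec_gen c 0]
  unfold expand
  congr 1
  funext i
  rw [shift_eq_pow]
  norm_num

lemma count_expandRec (c : List Int) : ∀ (s j : Nat),
    (expandRec c s).count ((2:Int)^j) =
      if s ≤ j ∧ j - s < c.length then (c.getD (j - s) 0).toNat else 0 := by
  induction c with
  | nil => intro s j; simp [expandRec]
  | cons a t ih =>
    intro s j
    rw [expandRec, List.count_append, List.count_replicate, ih (s + 1) j]
    by_cases hjs : j = s
    · subst hjs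
      rw [if_pos (by simp), if_neg (by omega), if_pos (by simp)]
      simp
    · have hbe : ¬ ((2:Int)^s == 2^j) = true := by
        simp only [beq_iff_eq]
        intro hc; exact hjs (pow2_inj hc).symm
      rw [if_neg hbe, Nat.zero_add]
      split_ifs with h1 h2 h2
      · rw [show j - s = (j - (s + 1)) + 1 by omega, List.getD_cons_succ]
      · exfalso; simp only [List.length_cons] at h2; omega
      · exfalso; simp only [List.length_cons] at h2; omega
      · rfl

lemma mem_expandRec : ∀ {c : List Int} {s : Nat} {x : Int}, x ∈ expandRec c s →
    ∃ j, j < c.length ∧ x = (2:Int)^(s + j) := by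
  intro c
  induction c with
  | nil => intro s x hx; simp [expandRec] at hx
  | cons a t ih =>
    intro s x hx
    rw [expandRec] at hx
    rcases List.mem_append.mp hx with h | h
    · exact ⟨0, by simp, by simpa using (List.eq_of_mem_replicate h)⟩
    · rcases ih h with ⟨j, hj, rfl⟩
      exact ⟨j + 1, by simpa using hj, by rw [show s + (j + 1) = (s + 1) + j by omega]⟩

lemma pairwise_expandRec (c : List Int) : ∀ (s : Nat), (expandRec c s).Pairwise (· ≤ ·) := by
  induction c with
  | nil => intro s; simp [expandRec]
  | cons a t ih =>
    intro s
    rw [expandRec, List.pairwise_append]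
    refine ⟨List.pairwise_replicate.mpr (by simp), ih (s + 1), ?_⟩
    intro x hx y hy
    rcases mem_expandRec hy with ⟨j, _, rfl⟩
    rw [List.eq_of_mem_replicate hx]
    exact pow2_mono (by omega)

lemma length_expandRec : ∀ {c : List Int}, (∀ x ∈ c, 0 ≤ x) → ∀ (s : Nat),
    ((expandRec c s).length : Int) = c.sum := by
  intro c
  induction c with
  | nil => intro _ s; simp [expandRec]
  | cons a t ih =>
    intro h s
    rw [expandRec, List.length_append, List.length_replicate, List.sum_cons]
    push_cast
    rw [ih (fun x hx => h x (List.mem_cons_of_mem _ hx)) (s + 1)]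
    have := h a (by simp)
    omega

lemma perm_expand {h c : List Int} (g : goodHeap h c) :
    (expandRec c 0).Perm (h.map (· * -1)) := by
  rw [List.perm_iff_count]
  intro v
  have hinj : Function.Injective (fun x : Int => x * -1) := by
    intro a b hab; dsimp at hab; omega
  by_cases hveq : ∃ j : Nat, v = (2:Int)^j
  · rcases hveq with ⟨j, rfl⟩
    have hcm := List.count_map_of_injective h (fun x : Int => x * -1) hinj (-((2:Int)^j))
    have hv2 : (2:Int)^j = (-((2:Int)^j)) * -1 := by ring
    rw [count_expandRec c 0 j]
    conv_rhs => rw [hv2]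
    rw [hcm]
    have hcnt := g.1 j
    by_cases hj : j < c.length
    · rw [if_pos (by omega)]
      simp only [Nat.sub_zero] at *
      omega
    · rw [if_neg (by omega)]
      rw [List.getD_eq_default c 0 (by omega)] at hcnt
      omega
  · rw [List.count_eq_zero.mpr, List.count_eq_zero.mpr]
    · intro hmem
      rcases List.mem_map.mp hmem with ⟨y, hy, rfl⟩
      rcases g.2 y hy with ⟨j, _, rfl⟩
      exact hveq ⟨j, by ring⟩
    · intro hmem
      rcases mem_expandRec hmem with ⟨j, _, rfl⟩
      exact hveq ⟨j, by simp⟩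

lemma sorted_goodHeap {h c : List Int} (g : goodHeap h c) :
    PySem.List.sorted (h.map (· * -1)) (fun x => x) false = expandRec c 0 := by
  exact PySem.List.sorted_id_eq_of_perm_of_pairwise _ _ (perm_expand g) (pairwise_expandRec c 0)

lemma length_goodHeap {h c : List Int} (g : goodHeap h c) : ((h.length : Int)) = c.sum := by
  have hp := (perm_expand g).length_eq
  rw [List.length_map] at hp
  rw [← hp, length_expandRec (goodHeap_nonneg g) 0]

lemma loop_lemma : ∀ (fuel : Nat) (h c : List Int), goodHeap h c →
    (fuel : Int) + c.sum ≤ wsum c →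
    ∃ cf, goodHeap (splitLoop fuel h) cf ∧ cf.sum = c.sum + fuel ∧
      levelSplit c.reverse (fuel : Int) = (cf.reverse, 0) := by
  intro fuel
  induction fuel with
  | zero =>
    intro h c g _
    refine ⟨c, by simpa [splitLoop] using g, by simp, ?_⟩
    simp only [Nat.cast_zero]
    rw [levelSplit_zero c.reverse 0 rfl
      (fun x hx => goodHeap_nonneg g x (List.mem_reverse.mp hx))]
  | succ fuel ih =>
    intro h c g hinv
    -- some level above 0 still holds a splittable piece
    have hex : ∃ x ∈ c, x ≠ 0 := by
      by_contra hall
      push_neg at hall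
      rw [sum_zeros hall, wsum_zeros hall] at hinv
      have : (1:Int) ≤ ((fuel + 1 : Nat) : Int) := by push_cast; omega
      omega
    rcases decomp_last_nonzero c hex with ⟨lo, y, zs, hc, hy, hz⟩
    have hy0 : 0 < y := by
      have := goodHeap_nonneg g y (by rw [hc]; simp)
      omega
    have hzsum : zs.sum = 0 := sum_zeros hz
    have hzw : wsum zs = 0 := wsum_zeros hz
    -- the top occupied level cannot be level 0
    have hlo : lo ≠ [] := by
      intro hnil
      subst hnil
      rw [hc] at hinv
      simp only [List.nil_append, List.sum_cons, wsum] at hinv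
      rw [hzsum, hzw] at hinv
      have : (1:Int) ≤ ((fuel + 1 : Nat) : Int) := by push_cast; omega
      omega
    rcases List.eq_nil_or_concat lo with rfl | ⟨lo', x, rfl⟩
    · exact absurd rfl hlo
    have hc2 : c = lo' ++ x :: y :: zs := by
      rw [hc]; simp [List.concat_eq_append]
    clear hc hlo hex
    set J := lo'.length + 1 with hJ
    have hgetJ : c.getD J 0 = y := by
      rw [hc2, getD_decomp]
      simp [hJ]
    -- the popped element is the largest power present
    have hmem : -((2:Int)^J) ∈ h := by
      rw [← List.count_pos_iff]
      have := g.1 J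
      rw [hgetJ] at this
      omega
    have hle : ∀ x' ∈ h, -((2:Int)^J) ≤ x' := by
      intro x' hx'
      rcases g.2 x' hx' with ⟨j, hj, rfl⟩
      have hcnt : 0 < h.count (-((2:Int)^j)) := List.count_pos_iff.mpr (by assumption)
      have hgd := g.1 j
      have hjJ : j ≤ J := by
        by_contra hgt
        push_neg at hgt
        rw [hc2, getD_decomp] at hgd
        rw [if_neg (by simp [hJ] at hgt ⊢; omega), if_neg (by omega), if_neg (by omega),
          getD_zeros hz] at hgd
        omega
      exact neg_le_neg (pow2_mono hjJ)
    have hminq : h.min? = some (-((2:Int)^J)) := List.min?_eq_some_iff.mpr ⟨hmem, hle⟩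
    -- one loop step
    have hhalf : PySem.Int.floordiv (-1 * (-1 * -((2:Int)^J))) 2 = -((2:Int)^lo'.length) := by
      have h1 : -1 * (-1 * -((2:Int)^J)) = 2 * -((2:Int)^lo'.length) := by
        rw [hJ, pow_succ]; ring
      rw [h1, PySem.Int.floordiv_eq_ediv_of_pos (by norm_num),
        Int.mul_ediv_cancel_left _ (by norm_num)]
    have hstep : splitLoop (fuel + 1) h =
        splitLoop fuel ((h.erase (-((2:Int)^J))) ++ [-((2:Int)^lo'.length), -((2:Int)^lo'.length)]) := by
      conv_lhs => rw [splitLoop]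
      simp only [heappopModel, hminq, hhalf]
    -- the updated counts
    set c' : List Int := lo' ++ (x + 2) :: (y - 1) :: zs with hc'
    have hlen : c'.length = c.length := by rw [hc2, hc']; simp
    have hg' : goodHeap ((h.erase (-((2:Int)^J))) ++ [-((2:Int)^lo'.length), -((2:Int)^lo'.length)]) c' := by
      constructor
      · intro j
        rw [List.count_append]
        have hpair : ([-((2:Int)^lo'.length), -((2:Int)^lo'.length)].count (-((2:Int)^j)))
            = if j = lo'.length then 2 else 0 := by
          by_cases hj : j = lo'.length
          · subst hj; simp
          · have : -((2:Int)^j) ≠ -((2:Int)^lo'.length) := by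
              intro hcon
              exact hj (pow2_inj (neg_inj.mp hcon))
            have hj2 : lo'.length ≠ j := fun hh => hj hh.symm
            simp [hj2, hj]
        have hgd := g.1 j
        rw [hc2, getD_decomp] at hgd
        rw [hc', getD_decomp, hpair]
        by_cases h1 : j < lo'.length
        · rw [if_pos h1] at hgd ⊢
          rw [List.count_erase_of_ne (by intro hcon; have := pow2_inj (neg_inj.mp hcon); omega)]
          push_cast
          omega
        · by_cases h2 : j = lo'.length
          · rw [if_neg h1, if_pos h2] at hgd ⊢
            rw [List.count_erase_of_ne (by intro hcon; have := pow2_inj (neg_inj.mp hcon); omega)]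
            push_cast
            omega
          · by_cases h3 : j = lo'.length + 1
            · rw [if_neg h1, if_neg h2, if_pos h3] at hgd ⊢
              have hjJ : -((2:Int)^j) = -((2:Int)^J) := by rw [h3, hJ]
              rw [hjJ] at hgd
              rw [hjJ, List.count_erase_self, if_neg (by omega : ¬ j = lo'.length)]
              have hcnt : 0 < h.count (-((2:Int)^J)) := by omega
              omega
            · rw [if_neg h1, if_neg h2, if_neg h3] at hgd ⊢
              rw [List.count_erase_of_ne (by intro hcon; have := pow2_inj (neg_inj.mp hcon); omega)]
              push_cast
              omega
      · intro x' hx'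
        rcases List.mem_append.mp hx' with h1 | h1
        · rcases g.2 x' (List.mem_of_mem_erase h1) with ⟨j, hj, rfl⟩
          exact ⟨j, by omega, rfl⟩
        · refine ⟨lo'.length, by rw [hlen, hc2]; simp, ?_⟩
          rcases List.mem_cons.mp h1 with rfl | h1
          · rfl
          · simpa using h1
    have hsum' : c'.sum = c.sum + 1 := by
      rw [hc', hc2]; simp; ring
    have hw' : wsum c' = wsum c := by
      rw [hc', hc2, wsum_append, wsum_append, wsum, wsum, wsum, wsum]; ring
    have hinv' : (fuel : Int) + c'.sum ≤ wsum c' := by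
      rw [hsum', hw']
      push_cast at hinv ⊢
      omega
    rcases ih _ _ hg' hinv' with ⟨cf, hgf, hsumf, hlsf⟩
    refine ⟨cf, by rwa [hstep], by rw [hsumf, hsum']; push_cast; ring, ?_⟩
    have hrev : c.reverse = zs.reverse ++ y :: x :: lo'.reverse := by
      rw [hc2]; simp
    have hrev' : c'.reverse = zs.reverse ++ (y - 1) :: (x + 2) :: lo'.reverse := by
      rw [hc']; simp
    have hstep2 := levelSplit_step zs.reverse y x lo'.reverse ((fuel + 1 : Nat) : Int)
      (fun z hzz => hz z (List.mem_reverse.mp hzz)) (by omega) (by push_cast; omega)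
    rw [hrev, hstep2, show ((fuel + 1 : Nat) : Int) - 1 = (fuel : Int) by push_cast; ring,
      ← hrev', hlsf]

-- ===== VERDICT (by name: the statement is the Claim_ definition above) =====
theorem check_spec : Claim_equal_check := by
  unfold Claim_equal_check Spec_check
  intro n k _ hpre
  by_cases hk : k > n
  · simp only [check, check_alt, if_pos hk]
  · have hn : 0 ≤ n := by
      rcases hpre with h | h
      · exact h
      · omega
    have hg0 := goodHeap_init n
    have hlen0 := length_goodHeap hg0
    simp only [check, check_alt, if_neg hk]
    by_cases htot : (bitList n).sum > k
    · rw [if_pos htot]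
      have hfuel : (k - (((pyBits n 0).map (· * -1)).length : Int)).toNat = 0 := by omega
      rw [hfuel]
      rw [if_pos (by simpa [splitLoop] using (by omega : ((((pyBits n 0).map (· * -1)).length : Int)) > k))]
    · rw [if_neg htot]
      have hfuelI : (((k - (((pyBits n 0).map (· * -1)).length : Int)).toNat : Int))
          = k - (bitList n).sum := by omega
      have hinv : (((k - (((pyBits n 0).map (· * -1)).length : Int)).toNat : Int)) + (bitList n).sum
          ≤ wsum (bitList n) := by
        rw [wsum_bitList hn]
        omega
      obtain ⟨cf, hgf, hsumf, hlsf⟩ :=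
        loop_lemma (k - (((pyBits n 0).map (· * -1)).length : Int)).toNat
          ((pyBits n 0).map (· * -1)) (bitList n) hg0 hinv
      have hlenf := length_goodHeap hgf
      rw [if_neg (by rw [hlenf, hsumf]; omega)]
      rw [← hfuelI, hlsf]
      rw [List.reverse_reverse, expand_eq_expandRec, sorted_goodHeap hgf]
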